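-- pv_equiv track=rewrite | github.com/ShlokC/mlScanner | grid_logic.py | _filter_close_levels
-- ===== SOURCE A (Python) =====
-- def _filter_close_levels(levels_dict, tolerance):
--     """Remove levels that are too close to each other"""
--     if not levels_dict:
--         return {}
--
--     sorted_levels = sorted(levels_dict.items(), key=lambda x: x[1], reverse=True)
--     filtered = {}
--
--     for price, strength in sorted_levels:
--         is_too_close = False
--         for selected_price in filtered:
--             if abs(price - selected_price) <= tolerance:
--                 is_too_close = True
--                 break
--
--         if not is_too_close:
--             filtered[price] = strength
--
--     return filtered
-- ===== SOURCE B (Python) =====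
-- import bisect
--
-- def _filter_close_levels(levels_dict, tolerance):
--     """Remove levels that are too close to each other"""
--     if not levels_dict:
--         return {}
--
--     filtered = {}
--     selected = []  # kept prices, ascending
--
--     for price, strength in sorted(levels_dict.items(), key=lambda x: x[1], reverse=True):
--         i = bisect.bisect_left(selected, price)
--         if (i > 0 and price - selected[i - 1] <= tolerance) or \
--            (i < len(selected) and selected[i] - price <= tolerance):
--             continue
--         filtered[price] = strength
--         bisect.insort(selected, price)
--
--     return filtered
-- ===== Notes on version B (the rewrite author's own statement) =====
-- stated objective: alternative
-- what changed: Replaces A's inner linear scan over all kept levels with a sorted list of kept prices and a bisect lookup that checks only the two nearest neighbours.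
import Mathlib
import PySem

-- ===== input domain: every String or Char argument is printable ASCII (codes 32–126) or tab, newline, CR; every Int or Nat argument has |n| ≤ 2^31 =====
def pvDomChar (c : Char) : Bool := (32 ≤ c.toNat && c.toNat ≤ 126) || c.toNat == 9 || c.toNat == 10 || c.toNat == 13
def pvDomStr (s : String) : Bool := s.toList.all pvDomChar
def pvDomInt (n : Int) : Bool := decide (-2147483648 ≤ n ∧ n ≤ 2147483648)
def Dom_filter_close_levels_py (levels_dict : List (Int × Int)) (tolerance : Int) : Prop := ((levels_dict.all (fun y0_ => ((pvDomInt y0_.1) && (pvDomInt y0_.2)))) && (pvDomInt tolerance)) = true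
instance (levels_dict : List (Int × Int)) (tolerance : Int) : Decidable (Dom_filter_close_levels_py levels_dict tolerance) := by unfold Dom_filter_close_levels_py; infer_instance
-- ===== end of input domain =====

-- B replaces A's inner linear scan over all kept levels by a bisect lookup in a
-- sorted list of kept prices, checking only the two nearest neighbours.


-- ===== PORT A =====
-- inner 'for selected_price in filtered: … break' loop of A, in key order
def tooCloseA (p tol : Int) : List Int → Bool
  | [] => false
  | k :: ks => if |p - k| ≤ tol then true else tooCloseA p tol ks

-- body of A's outer loop
def stepA (tol : Int) (d : PySem.Dict Int Int) (ps : Int × Int) : PySem.Dict Int Int :=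
  if tooCloseA ps.1 tol d.keys then d else d.insert ps.1 ps.2

def filter_close_levels_py (levels_dict : List (Int × Int)) (tolerance : Int) : List (Int × Int) :=
  if levels_dict = [] then []
  else
    let sorted_levels := PySem.List.sorted levels_dict (fun x => x.2) true
    let filtered := sorted_levels.foldl (stepA tolerance) PySem.Dict.empty
    filtered.items

-- ===== PORT B =====
-- bisect.insort into an ascending list (contract port of the stdlib call)
def insortB (p : Int) : List Int → List Int
  | [] => [p]
  | x :: xs => if p < x then p :: x :: xs else x :: insortB p xs

-- body of B's loop: bisect, compare with the two neighbours only
def stepB (tol : Int) (st : PySem.Dict Int Int × List Int) (ps : Int × Int) :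
    PySem.Dict Int Int × List Int :=
  let i := PySem.List.bisectLeft st.2 ps.1
  let tooClose : Bool :=
    (decide (0 < i) && decide (ps.1 - st.2.getD (i - 1) 0 ≤ tol))
      || (decide (i < st.2.length) && decide (st.2.getD i 0 - ps.1 ≤ tol))
  if tooClose then st else (st.1.insert ps.1 ps.2, insortB ps.1 st.2)

def filter_close_levels_py_alt (levels_dict : List (Int × Int)) (tolerance : Int) : List (Int × Int) :=
  if levels_dict = [] then []
  else
    ((PySem.List.sorted levels_dict (fun x => x.2) true).foldl
      (stepB tolerance) (PySem.Dict.empty, ([] : List Int))).1.items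

-- ===== PRECONDITION & SPEC =====
-- Pre_: the association list represents a Python dict, so its keys are pairwise distinct
-- (duplicate-key lists have no Python-dict counterpart and are excluded).
def Pre_filter_close_levels_py (levels_dict : List (Int × Int)) (tolerance : Int) : Prop :=
  (levels_dict.map Prod.fst).Nodup

instance (levels_dict : List (Int × Int)) (tolerance : Int) : Decidable (Pre_filter_close_levels_py levels_dict tolerance) := by unfold Pre_filter_close_levels_py; infer_instance

def pvWitness_filter_close_levels_py : (List (Int × Int)) × Int := ([(100, 5), (110, 3), (101, 7)], 2)

def Spec_filter_close_levels_py (levels_dict : List (Int × Int)) (tolerance : Int) (out : List (Int × Int)) : Prop := out = filter_close_levels_py_alt levels_dict tolerance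
instance (levels_dict : List (Int × Int)) (tolerance : Int) (out : List (Int × Int)) : Decidable (Spec_filter_close_levels_py levels_dict tolerance out) := by unfold Spec_filter_close_levels_py; infer_instance

-- ===== CLAIM (what is proved, stated in full; the proofs are below) =====
def Claim_equal_filter_close_levels_py : Prop := ∀ (levels_dict : List (Int × Int)) (tolerance : Int), Dom_filter_close_levels_py levels_dict tolerance → Pre_filter_close_levels_py levels_dict tolerance → Spec_filter_close_levels_py levels_dict tolerance (filter_close_levels_py levels_dict tolerance)

-- ===== LEMMAS AND PROOFS =====

theorem tooCloseA_eq_any (p tol : Int) (ks : List Int) :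
    tooCloseA p tol ks = ks.any (fun k => decide (|p - k| ≤ tol)) := by
  induction ks with
  | nil => rfl
  | cons k ks ih => by_cases h : |p - k| ≤ tol <;> simp [tooCloseA, h, ih]

theorem insortB_perm (p : Int) (xs : List Int) : (insortB p xs).Perm (p :: xs) := by
  induction xs with
  | nil => simp [insortB]
  | cons x xs ih =>
    by_cases h : p < x
    · simp [insortB, h]
    · simpa [insortB, h] using (ih.cons x).trans (List.Perm.swap p x xs)

theorem insortB_pairwise (p : Int) (xs : List Int) (hs : xs.Pairwise (· < ·))
    (hp : p ∉ xs) : (insortB p xs).Pairwise (· < ·) := by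
  induction xs with
  | nil => simp [insortB]
  | cons x xs ih =>
    rcases List.pairwise_cons.mp hs with ⟨hx, hxs⟩
    simp only [List.mem_cons, not_or] at hp
    by_cases h : p < x
    · simp only [insortB, if_pos h]
      refine List.pairwise_cons.mpr ⟨?_, hs⟩
      intro y hy
      rcases List.mem_cons.mp hy with rfl | hy
      · exact h
      · exact h.trans (hx y hy)
    · have hxp : x < p := lt_of_le_of_ne (not_lt.mp h) (fun e => hp.1 e.symm)
      simp only [insortB, if_neg h]
      refine List.pairwise_cons.mpr ⟨?_, ih hxs hp.2⟩
      intro y hy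
      rcases List.mem_cons.mp ((insortB_perm p xs).mem_iff.mp hy) with rfl | hy
      · exact hxp
      · exact hx y hy

-- B's neighbour check equals "some kept price is within tolerance" on a strictly
-- ascending kept list not containing p.
theorem tooCloseB_eq_any (sel : List Int) (p tol : Int)
    (hs : sel.Pairwise (· < ·)) (hp : p ∉ sel) :
    ((decide (0 < PySem.List.bisectLeft sel p) && decide (p - sel.getD (PySem.List.bisectLeft sel p - 1) 0 ≤ tol))
      || (decide (PySem.List.bisectLeft sel p < sel.length) && decide (sel.getD (PySem.List.bisectLeft sel p) 0 - p ≤ tol)))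
    = sel.any (fun k => decide (|p - k| ≤ tol)) := by
  have hle : sel.Pairwise (· ≤ ·) := hs.imp (fun h => le_of_lt h)
  obtain ⟨hlen, hlt, hge⟩ := PySem.List.bisectLeft_spec sel p hle
  set i := PySem.List.bisectLeft sel p with hi
  have hmono : ∀ (a b : Nat) (hb : b < sel.length) (hab : a ≤ b),
      sel[a]'(Nat.lt_of_le_of_lt hab hb) ≤ sel[b] := by
    intro a b hb hab
    rcases Nat.lt_or_ge a b with h | h
    · exact le_of_lt ((List.pairwise_iff_getElem.mp hs) a b (Nat.lt_of_le_of_lt hab hb) hb h)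
    · have : a = b := le_antisymm hab h
      subst this; rfl
  apply Bool.eq_iff_iff.mpr
  simp only [Bool.or_eq_true, Bool.and_eq_true, decide_eq_true_eq, List.any_eq_true]
  constructor
  · rintro (⟨h0, hL⟩ | ⟨hlt2, hR⟩)
    · have hi1 : i - 1 < sel.length := by omega
      refine ⟨sel[i-1], List.getElem_mem hi1, ?_⟩
      have := hlt (i-1) hi1 (by omega)
      rw [List.getD_eq_getElem sel 0 hi1] at hL
      rw [abs_sub_comm, abs_of_nonpos (by omega)]
      omega
    · refine ⟨sel[i], List.getElem_mem hlt2, ?_⟩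
      have h1 := hge i hlt2 (le_refl i)
      have h2 : p ≠ sel[i] := fun e => hp (e ▸ List.getElem_mem hlt2)
      rw [List.getD_eq_getElem sel 0 hlt2] at hR
      rw [abs_of_nonpos (by omega)]
      omega
  · rintro ⟨s, hmem, habs⟩
    obtain ⟨j, hj, rfl⟩ := List.getElem_of_mem hmem
    by_cases hji : j < i
    · left
      have h0 : 0 < i := by omega
      have hi1 : i - 1 < sel.length := by omega
      refine ⟨h0, ?_⟩
      rw [List.getD_eq_getElem sel 0 hi1]
      have hmj : sel[j] ≤ sel[i-1] := hmono j (i-1) hi1 (by omega)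
      have hjp : sel[j] < p := hlt j hj hji
      rw [abs_sub_comm, abs_of_nonpos (by omega)] at habs
      omega
    · right
      have hilt : i < sel.length := by omega
      refine ⟨hilt, ?_⟩
      rw [List.getD_eq_getElem sel 0 hilt]
      have hmj : sel[i] ≤ sel[j] := hmono i j hj (by omega)
      have hjp : p ≤ sel[j] := hge j hj (by omega)
      have hne : p ≠ sel[j] := fun e => hp (e ▸ List.getElem_mem hj)
      rw [abs_of_nonpos (by omega)] at habs
      omega

theorem stepB_eq (tol : Int) (d : PySem.Dict Int Int) (sel : List Int) (ps : Int × Int)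
    (h2 : sel.Perm d.keys) (h3 : sel.Pairwise (· < ·)) (hp : ps.1 ∉ sel) :
    stepB tol (d, sel) ps =
      if tooCloseA ps.1 tol d.keys then (d, sel)
      else (d.insert ps.1 ps.2, insortB ps.1 sel) := by
  have hcond : ((decide (0 < PySem.List.bisectLeft sel ps.1) && decide (ps.1 - sel.getD (PySem.List.bisectLeft sel ps.1 - 1) 0 ≤ tol))
      || (decide (PySem.List.bisectLeft sel ps.1 < sel.length) && decide (sel.getD (PySem.List.bisectLeft sel ps.1) 0 - ps.1 ≤ tol)))
      = tooCloseA ps.1 tol d.keys := by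
    rw [tooCloseB_eq_any sel ps.1 tol h3 hp, h2.any_eq, ← tooCloseA_eq_any]
  unfold stepB
  show (if ((decide (0 < PySem.List.bisectLeft sel ps.1) && decide (ps.1 - sel.getD (PySem.List.bisectLeft sel ps.1 - 1) 0 ≤ tol))
      || (decide (PySem.List.bisectLeft sel ps.1 < sel.length) && decide (sel.getD (PySem.List.bisectLeft sel ps.1) 0 - ps.1 ≤ tol))) = true
    then (d, sel) else (d.insert ps.1 ps.2, insortB ps.1 sel)) = _
  rw [hcond]

-- joint fold invariant: both folds build the same dict
theorem fold_inv (tol : Int) (L : List (Int × Int)) (d : PySem.Dict Int Int) (sel : List Int)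
    (h2 : sel.Perm d.keys) (h3 : sel.Pairwise (· < ·))
    (hn : (d.keys ++ L.map Prod.fst).Nodup) :
    L.foldl (stepA tol) d = (L.foldl (stepB tol) (d, sel)).1 := by
  induction L generalizing d sel with
  | nil => rfl
  | cons ps rest ih =>
    have hpk : ps.1 ∉ d.keys := by
      intro h
      exact (List.nodup_append.mp hn).2.2 ps.1 h ps.1 (by simp) rfl
    have hpsel : ps.1 ∉ sel := fun h => hpk (h2.mem_iff.mp h)
    simp only [List.foldl_cons, stepB_eq tol d sel ps h2 h3 hpsel]
    by_cases hc : tooCloseA ps.1 tol d.keys = true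
    · rw [show stepA tol d ps = d by simp [stepA, hc], if_pos hc]
      refine ih d sel h2 h3 ?_
      have hsub : (d.keys ++ rest.map Prod.fst).Sublist (d.keys ++ ps.1 :: rest.map Prod.fst) :=
        List.Sublist.append_left (List.sublist_cons_self _ _) _
      exact hsub.nodup (by simpa using hn)
    · rw [show stepA tol d ps = d.insert ps.1 ps.2 by simp [stepA, hc], if_neg hc]
      have hcont : d.contains ps.1 = false := by
        rcases Bool.eq_false_or_eq_true (d.contains ps.1) with h | h
        · exact absurd ((PySem.Dict.contains_iff_mem_keys d ps.1).mp h) hpk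
        · exact h
      have hkeys : (d.insert ps.1 ps.2).keys = d.keys ++ [ps.1] :=
        PySem.Dict.keys_insert_of_not_contains d ps.2 hcont
      refine ih (d.insert ps.1 ps.2) (insortB ps.1 sel) ?_ (insortB_pairwise ps.1 sel h3 hpsel) ?_
      · rw [hkeys]
        exact (insortB_perm ps.1 sel).trans ((h2.cons ps.1).trans (List.perm_append_singleton ps.1 d.keys).symm)
      · rw [hkeys]
        have hperm : ((d.keys ++ [ps.1]) ++ rest.map Prod.fst).Perm (d.keys ++ ps.1 :: rest.map Prod.fst) := by
          simp
        exact hperm.nodup_iff.mpr (by simpa using hn)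

-- ===== VERDICT (by name: the statement is the Claim_ definition above) =====
theorem filter_close_levels_py_spec : Claim_equal_filter_close_levels_py := by
  intro levels_dict tolerance _ hpre
  unfold Spec_filter_close_levels_py filter_close_levels_py filter_close_levels_py_alt
  by_cases he : levels_dict = []
  · simp [he]
  · rw [if_neg he, if_neg he]
    have hnodup : ((PySem.List.sorted levels_dict (fun x => x.2) true).map Prod.fst).Nodup :=
      ((PySem.List.sorted_perm levels_dict (fun x => x.2) true).map Prod.fst).nodup_iff.mpr hpre
    have := fold_inv tolerance (PySem.List.sorted levels_dict (fun x => x.2) true)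
      PySem.Dict.empty [] (by simp [PySem.Dict.keys_empty]) (by simp)
      (by simpa [PySem.Dict.keys_empty] using hnodup)
    simp only [this]
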